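-- pv_equiv track=rewrite | github.com/AmmadGetlicensed/laravel-codebase-graph | laravelgraph/pipeline/phase_15_middleware.py | _expand_middleware
-- ===== SOURCE A (Python) =====
-- def _expand_middleware(
--     raw_stack: list[str],
--     groups: dict[str, list[str]],
--     aliases: dict[str, str],
-- ) -> list[str]:
--     """Expand group names and resolve aliases to FQNs in the stack."""
--     expanded: list[str] = []
--     for item in raw_stack:
--         # Handle throttle:60,1 style parameters
--         base = item.split(":")[0] if ":" in item else item
--
--         if base in groups:
--             # Expand the group, preserving parameters on individual items
--             for group_item in groups[base]:
--                 group_base = group_item.split(":")[0] if ":" in group_item else group_item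
--                 resolved = aliases.get(group_base, group_item)
--                 # Re-attach params if present
--                 if ":" in group_item:
--                     params = group_item[group_item.index(":"):]
--                     resolved = resolved.split(":")[0] + params
--                 expanded.append(resolved)
--         else:
--             resolved = aliases.get(base, item)
--             if ":" in item and resolved != item:
--                 # Re-attach params
--                 params = item[item.index(":"):]
--                 resolved = resolved.split(":")[0] + params
--             expanded.append(resolved)
--
--     return expanded
-- ===== SOURCE B (Python) =====
-- def _expand_middleware(
--     raw_stack: list[str],
--     groups: dict[str, list[str]],
--     aliases: dict[str, str],
-- ) -> list[str]:
--     """Expand group names and resolve aliases to FQNs in the stack."""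
--     # Pass 1: expand groups into a flat stack (no alias resolution yet).
--     flat: list[str] = []
--     for item in raw_stack:
--         base = item.split(":")[0] if ":" in item else item
--         flat.extend(groups.get(base, [item]))
--
--     # Pass 2: resolve each flat item's alias, re-attaching any ":params" suffix.
--     def resolve(item: str) -> str:
--         base = item.split(":")[0] if ":" in item else item
--         resolved = aliases.get(base, item)
--         if ":" in item:
--             resolved = resolved.split(":")[0] + item[item.index(":"):]
--         return resolved
--
--     return [resolve(item) for item in flat]
-- ===== Notes on version B (the rewrite author's own statement) =====
-- stated objective: simpler
-- what changed: A's single loop with a nested group loop and a conditional `resolved != item` re-attach guard is re-decomposed into two passes: first expand groups into a flat stack, then map one uniform resolve(item) helper over it (the guard is proved redundant).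
import Mathlib
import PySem

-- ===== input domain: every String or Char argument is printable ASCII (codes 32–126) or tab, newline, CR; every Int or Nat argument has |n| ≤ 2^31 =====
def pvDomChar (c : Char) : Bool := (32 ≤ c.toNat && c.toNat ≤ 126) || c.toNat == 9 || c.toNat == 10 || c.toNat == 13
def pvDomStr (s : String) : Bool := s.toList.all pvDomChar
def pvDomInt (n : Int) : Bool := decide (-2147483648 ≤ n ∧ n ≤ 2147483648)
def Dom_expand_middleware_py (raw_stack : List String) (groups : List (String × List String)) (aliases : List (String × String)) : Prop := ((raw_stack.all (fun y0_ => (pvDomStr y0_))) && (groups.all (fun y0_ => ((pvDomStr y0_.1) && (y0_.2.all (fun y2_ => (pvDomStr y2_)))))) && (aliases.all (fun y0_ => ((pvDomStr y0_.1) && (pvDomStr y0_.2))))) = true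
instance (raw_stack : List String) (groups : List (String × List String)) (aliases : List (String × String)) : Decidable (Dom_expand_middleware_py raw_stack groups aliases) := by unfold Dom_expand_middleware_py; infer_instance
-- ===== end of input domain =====

-- B re-decomposes A's single nested loop into two passes (group expansion first, then one uniform
-- alias-resolve map over the flat stack); the return values are proved identical (objective: simpler).

-- shared exact primitives (both Python versions use the same built-ins)
-- s.split(":")[0]: split? is `some` for the non-empty separator ":" and never yields an empty list,
-- so the [0] indexing cannot raise and headD's default is never used
def pySplitColonHead (s : String) : String := ((PySem.Str.split? s ":").getD []).headD ""
def pyStrCat (a b : String) : String := String.ofList (a.toList ++ b.toList)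
def lookupD {ν : Type} (d : List (String × ν)) (k : String) (dflt : ν) : ν :=
  ((d.find? (fun p => p.1 == k)).map (·.2)).getD dflt
def containsKey {ν : Type} (d : List (String × ν)) (k : String) : Bool := d.any (fun p => p.1 == k)

-- ===== PORT A =====
-- literal transliteration of A: one loop, group branch with an inner loop over groups[base], and the
-- else branch with its `resolved != item` guard; item[item.index(":"):] is ported as slice-from-find,
-- exact because the `":" in item` guard makes str.index and str.find agree (no ValueError reachable)
def expand_middleware_py (raw_stack : List String) (groups : List (String × List String)) (aliases : List (String × String)) : List String :=
  raw_stack.foldl (fun expanded item =>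
    let base := if PySem.Str.isIn ":" item then pySplitColonHead item else item
    if containsKey groups base then
      (lookupD groups base []).foldl (fun expanded group_item =>
        let group_base := if PySem.Str.isIn ":" group_item then pySplitColonHead group_item else group_item
        let resolved := lookupD aliases group_base group_item
        let resolved := if PySem.Str.isIn ":" group_item then
            pyStrCat (pySplitColonHead resolved)
              (PySem.Str.slice group_item (some (PySem.Str.find group_item ":")) none)
          else resolved
        expanded ++ [resolved]) expanded
    else
      let resolved := lookupD aliases base item
      let resolved := if PySem.Str.isIn ":" item && resolved != item then
          pyStrCat (pySplitColonHead resolved)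
            (PySem.Str.slice item (some (PySem.Str.find item ":")) none)
        else resolved
      expanded ++ [resolved]) []

-- ===== PORT B =====
-- Source B's nested `def resolve(item)`
def pyResolve (aliases : List (String × String)) (item : String) : String :=
  let base := if PySem.Str.isIn ":" item then pySplitColonHead item else item
  let resolved := lookupD aliases base item
  if PySem.Str.isIn ":" item then
    pyStrCat (pySplitColonHead resolved)
      (PySem.Str.slice item (some (PySem.Str.find item ":")) none)
  else resolved

-- pass 1 builds `flat` (groups.get(base, [item]) extended onto the accumulator), pass 2 maps resolve
def expand_middleware_py_alt (raw_stack : List String) (groups : List (String × List String)) (aliases : List (String × String)) : List String :=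
  (raw_stack.foldl (fun flat item =>
    let base := if PySem.Str.isIn ":" item then pySplitColonHead item else item
    flat ++ lookupD groups base [item]) []).map (pyResolve aliases)

-- ===== PRECONDITION & SPEC =====
def Spec_expand_middleware_py (raw_stack : List String) (groups : List (String × List String)) (aliases : List (String × String)) (out : List String) : Prop := out = expand_middleware_py_alt raw_stack groups aliases
instance (raw_stack : List String) (groups : List (String × List String)) (aliases : List (String × String)) (out : List String) : Decidable (Spec_expand_middleware_py raw_stack groups aliases out) := by unfold Spec_expand_middleware_py; infer_instance

-- ===== CLAIM (what is proved, stated in full; the proofs are below) =====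
def Claim_equal_expand_middleware_py : Prop := ∀ (raw_stack : List String) (groups : List (String × List String)) (aliases : List (String × String)), Dom_expand_middleware_py raw_stack groups aliases → Spec_expand_middleware_py raw_stack groups aliases (expand_middleware_py raw_stack groups aliases)

-- ===== LEMMAS AND PROOFS =====
lemma splitOn_go_acc (sep : List Char) (fuel : Nat) :
    ∀ (l cur : List Char) (acc : List (List Char)),
    PySem.Chars.splitOn.go sep fuel l cur acc = acc.reverse ++ PySem.Chars.splitOn.go sep fuel l cur [] := by
  induction fuel with
  | zero => intro l cur acc; simp [PySem.Chars.splitOn.go]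
  | succ f ih =>
    intro l cur acc
    cases l with
    | nil => simp [PySem.Chars.splitOn.go]
    | cons c rest =>
      simp only [PySem.Chars.splitOn.go]
      split
      · rw [ih, ih (List.drop sep.length (c :: rest)) [] [cur.reverse]]
        simp
      · exact ih rest (c :: cur) acc

lemma splitOn_head (fuel : Nat) :
    ∀ (l cur : List Char), l.length < fuel →
    (PySem.Chars.splitOn.go [':'] fuel l cur []).headD [] = cur.reverse ++ l.takeWhile (· ≠ ':') := by
  induction fuel with
  | zero => omega
  | succ f ih =>
    intro l cur hl
    cases l with
    | nil => simp [PySem.Chars.splitOn.go]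
    | cons c rest =>
      simp only [PySem.Chars.splitOn.go]
      split
      · rename_i hpre
        have hc : c = ':' := by
          symm; simpa [List.isPrefixOf] using hpre
        rw [splitOn_go_acc]
        simp [hc]
      · rename_i hpre
        have hc : c ≠ ':' := by
          intro h; exact hpre (by simp [h, List.isPrefixOf])
        rw [ih rest (c :: cur) (by simpa using Nat.lt_of_succ_lt_succ hl)]
        simp [hc]

lemma takeWhile_eq_take_of_find {cs : List Char} {k : Nat}
    (h2 : [':'] <+: cs.drop k) (hmin : ∀ i < k, ¬ [':'] <+: cs.drop i) :
    cs.takeWhile (· ≠ ':') = cs.take k := by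
  induction cs generalizing k with
  | nil => simp at h2
  | cons c t ih =>
    cases k with
    | zero =>
      obtain ⟨t1, ht1⟩ := h2
      have hc : c = ':' := by simpa using congrArg List.head? ht1.symm
      simp [hc]
    | succ j =>
      have hc : c ≠ ':' := by
        intro h
        exact hmin 0 (Nat.succ_pos j) (by simp [h])
      rw [List.takeWhile_cons_of_pos (by simp [hc]), List.take_succ_cons,
        ih (k := j) (by simpa using h2) (fun i hi => by simpa using hmin (i+1) (by omega))]

lemma splitColonHead_toList (s : String) :
    (pySplitColonHead s).toList = s.toList.takeWhile (· ≠ ':') := by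
  have hb := PySem.Str.split?_map s ":"
  rw [show (":" : String).toList = [':'] from rfl] at hb
  rw [show PySem.Chars.split? s.toList [':'] = some (PySem.Chars.splitOn s.toList [':']) from by simp [PySem.Chars.split?]] at hb
  have hh : (PySem.Chars.splitOn s.toList [':']).headD [] = s.toList.takeWhile (· ≠ ':') := by
    have := splitOn_head (s.toList.length + 1) s.toList [] (by omega)
    simpa [PySem.Chars.splitOn] using this
  cases hL : PySem.Str.split? s ":" with
  | none => rw [hL] at hb; simp at hb
  | some L =>
    rw [hL] at hb
    simp only [Option.map_some, Option.some.injEq] at hb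
    rw [pySplitColonHead, hL]
    cases L with
    | nil => rw [← hh, ← hb]; simp
    | cons x xs => rw [← hh, ← hb]; simp

lemma reattach_self {s : String} (h : PySem.Str.isIn ":" s = true) :
    pyStrCat (pySplitColonHead s)
      (PySem.Str.slice s (some (PySem.Str.find s ":")) none) = s := by
  have hinf : [':'] <:+: s.toList := by
    have := (PySem.Str.isIn_iff_infix ":" s).mp h
    simpa using this
  have hpos : 0 ≤ PySem.Chars.find s.toList [':'] := (PySem.Chars.find_nonneg_iff _ _).mpr hinf
  obtain ⟨hpre, hmin⟩ := PySem.Chars.find_spec hpos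
  have htw : s.toList.takeWhile (· ≠ ':') = s.toList.take (PySem.Chars.find s.toList [':']).toNat :=
    takeWhile_eq_take_of_find hpre hmin
  have hs : (PySem.Str.slice s (some (PySem.Str.find s ":")) none).toList
      = s.toList.drop (PySem.Chars.find s.toList [':']).toNat := by
    rw [PySem.Str.toList_slice, PySem.Str.find_eq]
    rw [show (":" : String).toList = [':'] from rfl]
    simp [PySem.List.slice_from _ hpos]
  rw [pyStrCat, splitColonHead_toList, hs, htw, List.take_append_drop, String.ofList_toList]

lemma lookupD_of_contains {ν : Type} (d : List (String × ν)) (k : String)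
    (h : containsKey d k = true) (d1 d2 : ν) : lookupD d k d1 = lookupD d k d2 := by
  unfold containsKey at h
  unfold lookupD
  cases hf : d.find? (fun p => p.1 == k) with
  | none =>
    rw [List.find?_eq_none] at hf
    rw [List.any_eq_true] at h
    obtain ⟨p, hp, hpk⟩ := h
    exact absurd hpk (hf p hp)
  | some p => simp

lemma lookupD_of_not_contains {ν : Type} (d : List (String × ν)) (k : String)
    (h : containsKey d k = false) (d1 : ν) : lookupD d k d1 = d1 := by
  unfold containsKey at h
  unfold lookupD
  cases hf : d.find? (fun p => p.1 == k) with
  | some p =>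
    have := List.find?_some hf
    have hmem := List.mem_of_find?_eq_some hf
    rw [List.any_eq_false] at h
    exact absurd this (h p hmem)
  | none => simp

lemma else_eq_resolve (aliases : List (String × String)) (item : String) :
    (let base := if PySem.Str.isIn ":" item then pySplitColonHead item else item
     let resolved := lookupD aliases base item
     if PySem.Str.isIn ":" item && resolved != item then
        pyStrCat (pySplitColonHead resolved)
          (PySem.Str.slice item (some (PySem.Str.find item ":")) none)
      else resolved) = pyResolve aliases item := by
  unfold pyResolve
  by_cases hin : PySem.Str.isIn ":" item = true
  · simp only [hin, if_true, Bool.true_and]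
    by_cases heq : lookupD aliases (pySplitColonHead item) item = item
    · rw [heq]
      simp only [bne_self_eq_false, Bool.false_eq_true, if_false]
      rw [show PySem.Str.slice item (some (PySem.Str.find item ":")) none
            = PySem.Str.slice item (some (PySem.Chars.find item.toList [':'])) none from by
          rw [PySem.Str.find_eq]; rfl] at *
      exact (reattach_self hin).symm
    · rw [if_pos (by simpa [bne_iff_ne] using heq)]
  · simp only [Bool.not_eq_true] at hin
    have hin' : PySem.Chars.isIn [':'] item.toList = false := by simpa using hin
    simp [hin']

def contribA (groups : List (String × List String)) (aliases : List (String × String)) (item : String) : List String :=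
  if containsKey groups (if PySem.Str.isIn ":" item then pySplitColonHead item else item) then
    (lookupD groups (if PySem.Str.isIn ":" item then pySplitColonHead item else item) []).map (pyResolve aliases)
  else [pyResolve aliases item]

def flatB (groups : List (String × List String)) (item : String) : List String :=
  lookupD groups (if PySem.Str.isIn ":" item then pySplitColonHead item else item) [item]

lemma contrib_eq (groups : List (String × List String)) (aliases : List (String × String)) (item : String) :
    contribA groups aliases item = (flatB groups item).map (pyResolve aliases) := by
  unfold contribA flatB
  by_cases hc : containsKey groups (if PySem.Str.isIn ":" item then pySplitColonHead item else item) = true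
  · rw [lookupD_of_contains _ _ hc [] [item]]
    rw [if_pos hc]
  · rw [if_neg hc, lookupD_of_not_contains _ _ (by simpa using hc)]
    simp

lemma bodyA_eq (groups : List (String × List String)) (aliases : List (String × String)) :
    (fun (expanded : List String) (item : String) =>
      let base := if PySem.Str.isIn ":" item then pySplitColonHead item else item
      if containsKey groups base then
        (lookupD groups base []).foldl (fun expanded group_item =>
          let group_base := if PySem.Str.isIn ":" group_item then pySplitColonHead group_item else group_item
          let resolved := lookupD aliases group_base group_item
          let resolved := if PySem.Str.isIn ":" group_item then
              pyStrCat (pySplitColonHead resolved)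
                (PySem.Str.slice group_item (some (PySem.Str.find group_item ":")) none)
            else resolved
          expanded ++ [resolved]) expanded
      else
        let resolved := lookupD aliases base item
        let resolved := if PySem.Str.isIn ":" item && resolved != item then
            pyStrCat (pySplitColonHead resolved)
              (PySem.Str.slice item (some (PySem.Str.find item ":")) none)
          else resolved
        expanded ++ [resolved])
    = fun (acc : List String) (item : String) => acc ++ contribA groups aliases item := by
  funext acc item
  show (if containsKey groups (if PySem.Str.isIn ":" item then pySplitColonHead item else item) then _ else _) = _
  unfold contribA
  by_cases hc : containsKey groups (if PySem.Str.isIn ":" item then pySplitColonHead item else item) = true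
  · rw [if_pos hc, if_pos hc]
    exact PySem.List.foldl_append_singleton_eq_map (pyResolve aliases) _ acc
  · rw [if_neg hc, if_neg hc]
    exact congrArg (fun r => acc ++ [r]) (else_eq_resolve aliases item)

theorem expand_middleware_py_spec' (raw_stack : List String) (groups : List (String × List String)) (aliases : List (String × String)) :
    expand_middleware_py raw_stack groups aliases = expand_middleware_py_alt raw_stack groups aliases := by
  unfold expand_middleware_py expand_middleware_py_alt
  rw [bodyA_eq groups aliases,
    PySem.List.foldl_append_eq_flatMap (contribA groups aliases) raw_stack [],
    show (raw_stack.foldl (fun flat item =>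
        let base := if PySem.Str.isIn ":" item then pySplitColonHead item else item
        flat ++ lookupD groups base [item]) []) = raw_stack.flatMap (flatB groups) from
      PySem.List.foldl_append_eq_flatMap (flatB groups) raw_stack [],
    List.map_flatMap]
  exact congrArg (fun f => raw_stack.flatMap f) (funext (contrib_eq groups aliases))


-- ===== VERDICT (by name: the statement is the Claim_ definition above) =====
theorem expand_middleware_py_spec : Claim_equal_expand_middleware_py := by
  intro raw_stack groups aliases _
  exact expand_middleware_py_spec' raw_stack groups aliases
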